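-- pv_equiv track=rewrite | github.com/Julian-Chu/leetcode_python | lintcode/lintcode139.py | subarraySumClosest
-- ===== SOURCE A (Python) =====
-- def subarraySumClosest(nums):
--     if not nums:
--         return []
--     n = len(nums)
--     prefix_sum = [0] * (n + 1)
--     for i in range(n):
--         prefix_sum[i + 1] = prefix_sum[i] + nums[i]
--
--     min_sum = float('inf')
--     res = [0, 0]
--     for i in range(n):
--         for j in range(i, n):
--             tmp = abs(prefix_sum[j + 1] - prefix_sum[i])
--             if min_sum > tmp:
--                 min_sum = tmp
--                 res = [i, j]
--                 if tmp == 0: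
--                     return res
--
--     return res
-- ===== SOURCE B (Python) =====
-- def subarraySumClosest(nums):
--     if not nums:
--         return []
--     prefix = [(0, 0)]
--     s = 0
--     for k in range(len(nums)):
--         s += nums[k]
--         prefix.append((s, k + 1))
--     prefix.sort()
--     best = None
--     for a in range(len(prefix) - 1):
--         (v1, p1), (v2, p2) = prefix[a], prefix[a + 1]
--         i, j = (p1, p2) if p1 < p2 else (p2, p1)
--         cand = (v2 - v1, i, j - 1)
--         if best is None or cand < best:
--             best = cand
--     return [best[1], best[2]]
-- ===== Notes on version B (the rewrite author's own statement) =====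
-- stated objective: faster
-- what changed: A scans all O(n^2) subarray (i,j) pairs tracking the smallest |prefix[j+1]-prefix[i]|; B sorts the prefix sums paired with their indices once and scans only adjacent pairs of the sorted list, picking the lexicographically least (difference, i, j) triple, which provably coincides with A's first-hit minimum.
import Mathlib
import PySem

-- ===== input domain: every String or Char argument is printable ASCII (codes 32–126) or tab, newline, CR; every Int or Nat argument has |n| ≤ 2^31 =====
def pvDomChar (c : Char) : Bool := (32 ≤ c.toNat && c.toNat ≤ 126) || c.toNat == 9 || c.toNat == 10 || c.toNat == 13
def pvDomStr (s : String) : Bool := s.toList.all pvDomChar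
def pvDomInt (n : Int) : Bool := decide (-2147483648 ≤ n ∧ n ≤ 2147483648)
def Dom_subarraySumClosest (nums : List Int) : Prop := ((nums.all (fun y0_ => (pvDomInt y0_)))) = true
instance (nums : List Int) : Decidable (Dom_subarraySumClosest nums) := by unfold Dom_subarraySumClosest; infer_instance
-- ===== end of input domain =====

-- B replaces A's O(n^2) scan of all (i,j) pairs by sorting the prefix sums (with their
-- indices) once and scanning only ADJACENT pairs of the sorted list — an O(n log n) algorithm.

-- ===== PORT A =====
-- A's `min_sum = float('inf')` is modelled as `none` (it is only ever compared against); exact.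
def pvInfGt (m : Option Int) (tmp : Int) : Bool :=
  match m with
  | none => true
  | some ms => decide (tmp < ms)

def subarraySumClosest (nums : List Int) : List Int :=
  if nums = [] then []
  else
    let n := nums.length
    -- prefix_sum = [0]*(n+1); prefix_sum[i+1] = prefix_sum[i] + nums[i]  (indices always in range)
    let prefixSum : List Int := (List.range n).foldl
      (fun ps i => ps.set (i + 1) (PySem.List.pyGetD ps (i : Int) 0 + PySem.List.pyGetD nums (i : Int) 0))
      (List.replicate (n + 1) 0)
    -- the double loop; `.inr r` models Python's early `return res`
    let r := (List.range n).foldl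
      (fun (st : (Option Int × List Int) ⊕ List Int) (i : Nat) =>
        (List.range' i (n - i)).foldl
          (fun st (j : Nat) =>
            match st with
            | .inr r => .inr r
            | .inl (minSum, res) =>
              let tmp := |PySem.List.pyGetD prefixSum ((j : Int) + 1) 0 -
                          PySem.List.pyGetD prefixSum (i : Int) 0|
              if pvInfGt minSum tmp then
                if tmp = 0 then .inr [(i : Int), (j : Int)]
                else .inl (some tmp, [(i : Int), (j : Int)])
              else .inl (minSum, res))
          st)
      (.inl (none, [0, 0]))
    match r with
    | .inl (_, res) => res
    | .inr res => res

-- ===== PORT B =====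
-- Python's `<` on int 3-tuples (lexicographic)
def pvLt3 (a b : Int × Int × Int) : Bool :=
  decide (a.1 < b.1) ||
    (decide (a.1 = b.1) &&
      (decide (a.2.1 < b.2.1) || (decide (a.2.1 = b.2.1) && decide (a.2.2 < b.2.2))))

def subarraySumClosest_alt (nums : List Int) : List Int :=
  if nums = [] then []
  else
    -- prefix = [(0,0)]; s = 0; for k: s += nums[k]; prefix.append((s, k+1))
    let built := (List.range nums.length).foldl
      (fun (st : List (Int × Int) × Int) (k : Nat) =>
        let s := st.2 + PySem.List.pyGetD nums (k : Int) 0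
        (st.1 ++ [(s, (k : Int) + 1)], s))
      ([(0, 0)], 0)
    -- prefix.sort()  (tuples compare lexicographically)
    let ps := PySem.List.sorted2 built.1 (fun t => t.1) (fun t => t.2) false
    -- scan adjacent pairs keeping the lexicographically least (diff, i, j)
    let best := (List.range (ps.length - 1)).foldl
      (fun (best : Option (Int × Int × Int)) (a : Nat) =>
        let p := PySem.List.pyGetD ps (a : Int) (0, 0)
        let q := PySem.List.pyGetD ps ((a : Int) + 1) (0, 0)
        let ij := if p.2 < q.2 then (p.2, q.2) else (q.2, p.2)
        let cand := (q.1 - p.1, ij.1, ij.2 - 1)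
        match best with
        | none => some cand
        | some b => if pvLt3 cand b then some cand else some b)
      none
    match best with
    | some b => [b.2.1, b.2.2]
    | none => []  -- unreachable for nums ≠ [] (Source B's best is never None there)

-- ===== PRECONDITION & SPEC =====
def Spec_subarraySumClosest (nums : List Int) (out : List Int) : Prop := out = subarraySumClosest_alt nums
instance (nums : List Int) (out : List Int) : Decidable (Spec_subarraySumClosest nums out) := by unfold Spec_subarraySumClosest; infer_instance

-- ===== CLAIM (what is proved, stated in full; the proofs are below) =====
def Claim_equal_subarraySumClosest : Prop := ∀ (nums : List Int), Dom_subarraySumClosest nums → Spec_subarraySumClosest nums (subarraySumClosest nums)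

-- ===== LEMMAS AND PROOFS =====

-- spec-level objects ------------------------------------------------------
def pvS (nums : List Int) (k : Nat) : Int := (nums.take k).sum

def pvPfx (nums : List Int) : List (Int × Int) :=
  (List.range (nums.length + 1)).map (fun k => (pvS nums k, (k : Int)))

def pvTrip (nums : List Int) (i j : Nat) : Int × Int × Int :=
  (|pvS nums (j + 1) - pvS nums i|, (i : Int), (j : Int))

def pvCands (nums : List Int) : List (Int × Int × Int) :=
  (List.range nums.length).flatMap
    (fun i => (List.range' i (nums.length - i)).map (pvTrip nums i))

def pvStepA (st : (Option Int × List Int) ⊕ List Int) (c : Int × Int × Int) :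
    (Option Int × List Int) ⊕ List Int :=
  match st with
  | .inr r => .inr r
  | .inl (m, res) =>
    if pvInfGt m c.1 then
      if c.1 = 0 then .inr [c.2.1, c.2.2] else .inl (some c.1, [c.2.1, c.2.2])
    else .inl (m, res)

def pvStepB (st : Option Int × List Int) (c : Int × Int × Int) : Option Int × List Int :=
  if pvInfGt st.1 c.1 then (some c.1, [c.2.1, c.2.2]) else st

def pvOutA : (Option Int × List Int) ⊕ List Int → List Int
  | .inl (_, r) => r
  | .inr r => r

def pvM3 (a c : Int × Int × Int) : Int × Int × Int := if pvLt3 c a then c else a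

def pvMinL : List (Int × Int × Int) → Option (Int × Int × Int)
  | [] => none
  | c :: t => some (t.foldl pvM3 c)

def pvLexLt (a b : Int × Int) : Prop := a.1 < b.1 ∨ (a.1 = b.1 ∧ a.2 < b.2)

def pvIjLt (a b : Int × Int × Int) : Prop := a.2.1 < b.2.1 ∨ (a.2.1 = b.2.1 ∧ a.2.2 < b.2.2)

def pvCandT (p q : Int × Int) : Int × Int × Int := (q.1 - p.1, min p.2 q.2, max p.2 q.2 - 1)

def pvBLt (a b : Int × Int) : Bool :=
  decide (a.1 < b.1) || (!decide (b.1 < a.1) && decide (a.2 < b.2))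

def pvPs (nums : List Int) : List (Int × Int) :=
  PySem.List.sorted2 (pvPfx nums) (fun t => t.1) (fun t => t.2) false

def pvAdj (nums : List Int) : List (Int × Int × Int) :=
  (List.range ((pvPs nums).length - 1)).map
    (fun a => pvCandT ((pvPs nums).getD a (0, 0)) ((pvPs nums).getD (a + 1) (0, 0)))

-- order facts -------------------------------------------------------------
lemma lt3_irrefl (a : Int × Int × Int) : pvLt3 a a = false := by
  obtain ⟨a1, a2, a3⟩ := a
  simp [pvLt3]

lemma lt3_conn {a b : Int × Int × Int} (h1 : pvLt3 a b = false) (h2 : pvLt3 b a = false) : a = b := by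
  obtain ⟨a1, a2, a3⟩ := a; obtain ⟨b1, b2, b3⟩ := b
  simp [pvLt3] at *
  refine ⟨?_, ?_, ?_⟩ <;> omega

lemma lt3_trans {a b c : Int × Int × Int} (h1 : pvLt3 a b = true) (h2 : pvLt3 b c = true) :
    pvLt3 a c = true := by
  obtain ⟨a1, a2, a3⟩ := a; obtain ⟨b1, b2, b3⟩ := b; obtain ⟨c1, c2, c3⟩ := c
  simp only [pvLt3, Bool.or_eq_true, Bool.and_eq_true, decide_eq_true_eq] at *
  omega

-- the B-side fold computes pvMinL -----------------------------------------
lemma foldB_some (t : List (Int × Int × Int)) (b : Int × Int × Int) :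
    t.foldl (fun (best : Option (Int × Int × Int)) c =>
        match best with
        | none => some c
        | some b => if pvLt3 c b then some c else some b) (some b)
      = some (t.foldl pvM3 b) := by
  induction t generalizing b with
  | nil => rfl
  | cons c t ih => simp only [List.foldl_cons, pvM3]; split <;> exact ih _

lemma foldB_minL (l : List (Int × Int × Int)) (h : l ≠ []) :
    l.foldl (fun (best : Option (Int × Int × Int)) c =>
        match best with
        | none => some c
        | some b => if pvLt3 c b then some c else some b) none
      = pvMinL l := by
  match l with
  | c :: t => simpa [pvMinL] using foldB_some t c

-- pvMinL really is the (first-hit) lexicographic minimum ------------------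
lemma foldM3_mem (t : List (Int × Int × Int)) (b : Int × Int × Int) :
    t.foldl pvM3 b ∈ b :: t := by
  induction t generalizing b with
  | nil => simp
  | cons c t ih =>
    have := ih (pvM3 b c)
    rcases List.mem_cons.1 this with he | ht
    · rw [List.foldl_cons, he]
      unfold pvM3
      split <;> simp
    · simp [List.foldl_cons, List.mem_cons, ht]

lemma foldM3_min (t : List (Int × Int × Int)) (b : Int × Int × Int) :
    ∀ x ∈ b :: t, pvLt3 x (t.foldl pvM3 b) = false := by
  induction t generalizing b with
  | nil =>
    intro x hx
    simp only [List.mem_cons, List.not_mem_nil, or_false] at hx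
    subst hx
    exact lt3_irrefl _
  | cons c t ih =>
    intro x hx
    rw [List.foldl_cons]
    have hmin := ih (pvM3 b c)
    have hkey : pvLt3 c (t.foldl pvM3 (pvM3 b c)) = false ∧
        pvLt3 b (t.foldl pvM3 (pvM3 b c)) = false := by
      by_cases hcb : pvLt3 c b = true
      · have hm3 : pvM3 b c = c := by unfold pvM3; rw [if_pos hcb]
        have hc := hmin c (by rw [hm3]; simp)
        refine ⟨hc, ?_⟩
        by_contra hb'
        rw [Bool.not_eq_false] at hb'
        have := lt3_trans hcb hb'
        simp [this] at hc
      · have hm3 : pvM3 b c = b := by unfold pvM3; rw [if_neg hcb]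
        have hbf := hmin b (by rw [hm3]; simp)
        refine ⟨?_, hbf⟩
        by_contra hc'
        rw [Bool.not_eq_false] at hc'
        by_cases hmb : pvLt3 (t.foldl pvM3 (pvM3 b c)) b = true
        · exact hcb (lt3_trans hc' hmb)
        · have heq : t.foldl pvM3 (pvM3 b c) = b :=
            lt3_conn (by simpa using hmb) hbf
          rw [heq] at hc'
          exact hcb hc'
    rcases List.mem_cons.1 hx with he | hx'
    · rw [he]; exact hkey.2
    rcases List.mem_cons.1 hx' with he | hx''
    · rw [he]; exact hkey.1
    · exact hmin x (by simp [hx''])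

lemma minL_mem {l : List (Int × Int × Int)} {m} (h : pvMinL l = some m) : m ∈ l := by
  match l with
  | c :: t =>
    simp only [pvMinL, Option.some.injEq] at h
    subst h
    exact foldM3_mem t c

lemma minL_min {l : List (Int × Int × Int)} {m} (h : pvMinL l = some m) :
    ∀ x ∈ l, pvLt3 x m = false := by
  match l with
  | c :: t =>
    simp only [pvMinL, Option.some.injEq] at h
    subst h
    exact foldM3_min t c

-- A's early-return double loop is pvStepA over pvCands --------------------
lemma foldl_stepA_inr (l : List (Int × Int × Int)) (r : List Int) :
    l.foldl pvStepA (.inr r) = .inr r := by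
  induction l with
  | nil => rfl
  | cons c t ih => simpa [pvStepA] using ih

lemma foldl_stepB_zero (l : List (Int × Int × Int)) (h : ∀ c ∈ l, 0 ≤ c.1) (r : List Int) :
    l.foldl pvStepB (some 0, r) = (some 0, r) := by
  induction l with
  | nil => rfl
  | cons c t ih =>
    have hc : pvInfGt (some 0) c.1 = false := by
      simp [pvInfGt]; exact h c (by simp)
    simp only [List.foldl_cons, pvStepB, hc]
    exact ih (fun c hc => h c (by simp [hc]))

lemma outA_eq_foldB (l : List (Int × Int × Int)) (h : ∀ c ∈ l, 0 ≤ c.1)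
    (s : Option Int × List Int) :
    pvOutA (l.foldl pvStepA (.inl s)) = (l.foldl pvStepB s).2 := by
  induction l generalizing s with
  | nil => rfl
  | cons c t ih =>
    have h0 : 0 ≤ c.1 := h c (by simp)
    have ht : ∀ c ∈ t, 0 ≤ c.1 := fun c hc => h c (by simp [hc])
    simp only [List.foldl_cons, pvStepA, pvStepB]
    by_cases hg : pvInfGt s.1 c.1 = true
    · by_cases hz : c.1 = 0
      · simp only [hz] at hg
        simp [hg, hz, foldl_stepA_inr, foldl_stepB_zero t ht, pvOutA]
      · simp [hg, hz]; exact ih ht _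
    · simp at hg
      simp [hg]
      have := ih ht (s.1, s.2)
      simpa using this

-- the pvStepB fold finds the minimum when (i,j) is strictly increasing ----
lemma foldB_min (t : List (Int × Int × Int)) (b : Int × Int × Int)
    (hb : ∀ c ∈ t, pvIjLt b c) (ht : t.Pairwise pvIjLt) :
    t.foldl pvStepB (some b.1, [b.2.1, b.2.2])
      = (some (t.foldl pvM3 b).1, [(t.foldl pvM3 b).2.1, (t.foldl pvM3 b).2.2]) := by
  induction t generalizing b with
  | nil => rfl
  | cons c t ih =>
    rw [List.foldl_cons, List.foldl_cons]
    have hbc : pvIjLt b c := hb c (by simp)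
    have hb' : ∀ d ∈ t, pvIjLt b d := fun d hd => hb d (by simp [hd])
    have hc' : ∀ d ∈ t, pvIjLt c d := fun d hd => (List.pairwise_cons.1 ht).1 d hd
    have ht' : t.Pairwise pvIjLt := (List.pairwise_cons.1 ht).2
    by_cases hlt : pvLt3 c b = true
    · have hval : c.1 < b.1 := by
        obtain ⟨b1, b2, b3⟩ := b; obtain ⟨c1, c2, c3⟩ := c
        simp only [pvLt3, Bool.or_eq_true, Bool.and_eq_true, decide_eq_true_eq] at hlt
        rcases hbc with h | h <;> simp only [pvIjLt] at * <;> omega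
      have hstep : pvStepB (some b.1, [b.2.1, b.2.2]) c = (some c.1, [c.2.1, c.2.2]) := by
        simp [pvStepB, pvInfGt, hval]
      rw [hstep]
      unfold pvM3
      rw [if_pos hlt]
      exact ih c hc' ht'
    · have hval : ¬ c.1 < b.1 := by
        obtain ⟨b1, b2, b3⟩ := b; obtain ⟨c1, c2, c3⟩ := c
        simp [pvLt3] at hlt
        omega
      have hstep : pvStepB (some b.1, [b.2.1, b.2.2]) c = (some b.1, [b.2.1, b.2.2]) := by
        simp [pvStepB, pvInfGt, hval]
      rw [hstep]
      unfold pvM3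
      rw [if_neg hlt]
      exact ih b hb' ht'

-- generic: pairwise of a flatMap ------------------------------------------
lemma pairwise_flatMap {α β : Type} {R : β → β → Prop} (l : List α) (f : α → List β)
    (h1 : ∀ a ∈ l, (f a).Pairwise R)
    (h2 : l.Pairwise (fun a b => ∀ x ∈ f a, ∀ y ∈ f b, R x y)) :
    (l.flatMap f).Pairwise R := by
  induction l with
  | nil => simp
  | cons a t ih =>
    rw [List.flatMap_cons, List.pairwise_append]
    refine ⟨h1 a (by simp), ih (fun a ha => h1 a (by simp [ha])) (List.Pairwise.sublist (by simp) h2), ?_⟩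
    intro x hx y hy
    rw [List.mem_flatMap] at hy
    obtain ⟨b, hb, hyb⟩ := hy
    exact (List.pairwise_cons.1 h2).1 b hb x hx y hyb

lemma cands_pairwise (nums : List Int) : (pvCands nums).Pairwise pvIjLt := by
  apply pairwise_flatMap
  · intro i _
    apply List.Pairwise.map (R := fun a b : Nat => a < b)
    · intro a b hab
      right
      simp only [pvTrip]
      exact ⟨by simp, by exact_mod_cast hab⟩
    · exact List.pairwise_lt_range' 1
  · apply List.Pairwise.imp ?_ (List.pairwise_lt_range (n := nums.length))
    intro a b hab x hx y hy
    simp only [List.mem_map] at hx hy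
    obtain ⟨j, _, rfl⟩ := hx
    obtain ⟨j', _, rfl⟩ := hy
    left
    simp only [pvTrip]
    exact_mod_cast hab

lemma mem_cands {nums : List Int} {x : Int × Int × Int} :
    x ∈ pvCands nums ↔ ∃ p q : Nat, p < q ∧ q ≤ nums.length ∧
      x = (|pvS nums q - pvS nums p|, (p : Int), (q : Int) - 1) := by
  constructor
  · intro hx
    simp only [pvCands, List.mem_flatMap, List.mem_map, List.mem_range, List.mem_range'_1] at hx
    obtain ⟨i, hi, j, ⟨hij, hjn⟩, rfl⟩ := hx
    refine ⟨i, j + 1, by omega, by omega, ?_⟩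
    simp only [pvTrip]
    push_cast
    ring_nf
  · rintro ⟨p, q, hpq, hqn, rfl⟩
    simp only [pvCands, List.mem_flatMap, List.mem_map, List.mem_range, List.mem_range'_1]
    refine ⟨p, by omega, q - 1, ⟨by omega, by omega⟩, ?_⟩
    simp only [pvTrip]
    have hq : q - 1 + 1 = q := by omega
    rw [hq]
    simp only [Prod.mk.injEq]
    refine ⟨by simp, by simp, ?_⟩
    omega

lemma cands_nonneg {nums : List Int} {x : Int × Int × Int} (h : x ∈ pvCands nums) : 0 ≤ x.1 := by
  rw [mem_cands] at h
  obtain ⟨p, q, _, _, rfl⟩ := h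
  exact abs_nonneg _

-- prefix sums -------------------------------------------------------------
lemma pvS_succ (nums : List Int) (m : Nat) (hm : m < nums.length) :
    pvS nums (m + 1) = pvS nums m + PySem.List.pyGetD nums (m : Int) 0 := by
  rw [PySem.List.pyGetD_natCast, List.getD_eq_getElem _ _ hm]
  simp [pvS, List.sum_take_succ _ m hm]

lemma prefix_build (nums : List Int) :
    ∀ m, m ≤ nums.length →
    (List.range m).foldl
      (fun ps i => ps.set (i + 1) (PySem.List.pyGetD ps (i : Int) 0 + PySem.List.pyGetD nums (i : Int) 0))
      (List.replicate (nums.length + 1) 0)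
      = (List.range (m + 1)).map (pvS nums) ++ List.replicate (nums.length - m) 0 := by
  intro m
  induction m with
  | zero =>
    intro _
    simp [pvS, List.replicate_succ]
  | succ m ih =>
    intro hm
    rw [List.range_succ, List.foldl_append, ih (by omega)]
    simp only [List.foldl_cons, List.foldl_nil]
    have hlen1 : ((List.range (m + 1)).map (pvS nums)).length = m + 1 := by simp
    have hLm : PySem.List.pyGetD
        ((List.range (m + 1)).map (pvS nums) ++ List.replicate (nums.length - m) 0) (m : Int) 0
        = pvS nums m := by
      rw [PySem.List.pyGetD_natCast, List.getD_eq_getElem _ _ (by simp; omega)]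
      rw [List.getElem_append_left (by omega)]
      simp
    rw [hLm]
    rw [← pvS_succ nums m (by omega)]
    rw [List.set_append, if_neg (by omega)]
    rw [show nums.length - m = (nums.length - (m + 1)) + 1 by omega, List.replicate_succ]
    rw [hlen1, show m + 1 - (m + 1) = 0 by omega, List.set_cons_zero]
    simp [List.range_succ, List.append_assoc]

lemma getD_prefix (nums : List Int) (k : Nat) (hk : k ≤ nums.length) :
    PySem.List.pyGetD ((List.range (nums.length + 1)).map (pvS nums)) (k : Int) 0 = pvS nums k := by
  rw [PySem.List.pyGetD_natCast, List.getD_eq_getElem _ _ (by simp; omega)]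
  simp

lemma foldl_flatMap' {α β γ : Type} (l : List α) (f : α → List β) (g : γ → β → γ) (init : γ) :
    (l.flatMap f).foldl g init = l.foldl (fun st a => (f a).foldl g st) init := by
  induction l generalizing init with
  | nil => rfl
  | cons a t ih => simp [List.flatMap_cons, List.foldl_append, ih]

-- A's port equals selection from pvMinL (pvCands) -------------------------
lemma A_eq (nums : List Int) (h : nums ≠ []) :
    ∃ m, pvMinL (pvCands nums) = some m ∧ subarraySumClosest nums = [m.2.1, m.2.2] := by
  have hn : 0 < nums.length := List.length_pos_iff.2 h
  have hne : pvCands nums ≠ [] := by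
    have hmem : pvTrip nums 0 0 ∈ pvCands nums := by
      simp only [pvCands, List.mem_flatMap, List.mem_map, List.mem_range, List.mem_range'_1]
      exact ⟨0, hn, 0, ⟨le_refl 0, by omega⟩, rfl⟩
    exact List.ne_nil_of_mem hmem
  obtain ⟨c0, t0, hct⟩ := List.exists_cons_of_ne_nil hne
  have hminL : pvMinL (pvCands nums) = some (t0.foldl pvM3 c0) := by rw [hct]; rfl
  refine ⟨t0.foldl pvM3 c0, hminL, ?_⟩
  simp only [subarraySumClosest, if_neg h]
  rw [prefix_build nums nums.length (le_refl _)]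
  simp only [Nat.sub_self, List.replicate_zero, List.append_nil]
  have houter :
      (List.range nums.length).foldl
        (fun (st : (Option Int × List Int) ⊕ List Int) (i : Nat) =>
          (List.range' i (nums.length - i)).foldl
            (fun st (j : Nat) =>
              match st with
              | .inr r => .inr r
              | .inl (minSum, res) =>
                if pvInfGt minSum
                    |PySem.List.pyGetD ((List.range (nums.length + 1)).map (pvS nums)) ((j : Int) + 1) 0 -
                      PySem.List.pyGetD ((List.range (nums.length + 1)).map (pvS nums)) (i : Int) 0| then
                  if |PySem.List.pyGetD ((List.range (nums.length + 1)).map (pvS nums)) ((j : Int) + 1) 0 -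
                      PySem.List.pyGetD ((List.range (nums.length + 1)).map (pvS nums)) (i : Int) 0| = 0 then
                    .inr [(i : Int), (j : Int)]
                  else
                    .inl (some |PySem.List.pyGetD ((List.range (nums.length + 1)).map (pvS nums)) ((j : Int) + 1) 0 -
                      PySem.List.pyGetD ((List.range (nums.length + 1)).map (pvS nums)) (i : Int) 0|,
                      [(i : Int), (j : Int)])
                else .inl (minSum, res))
            st)
        (.inl (none, [0, 0]))
        = (pvCands nums).foldl pvStepA (.inl (none, [0, 0])) := by
    rw [pvCands, foldl_flatMap']
    apply PySem.List.foldl_congr_mem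
    intro st i hi
    rw [List.foldl_map]
    apply PySem.List.foldl_congr_mem
    intro st' j hj
    have hi' : i < nums.length := List.mem_range.1 hi
    have hj' : j < nums.length := by
      rw [List.mem_range'_1] at hj
      omega
    have hc1 : ((j : Int) + 1) = ((j + 1 : Nat) : Int) := by push_cast; ring
    rw [hc1, getD_prefix nums (j + 1) (by omega), getD_prefix nums i (by omega)]
    cases st' with
    | inr r => rfl
    | inl p =>
      obtain ⟨mm, res⟩ := p
      simp only [pvStepA, pvTrip]
  rw [houter]
  have hnn : ∀ c ∈ pvCands nums, 0 ≤ c.1 := fun c hc => cands_nonneg hc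
  have hout := outA_eq_foldB (pvCands nums) hnn (none, [0, 0])
  have hshape :
      (match (pvCands nums).foldl pvStepA (.inl (none, [0, 0])) with
        | .inl (_, res) => res
        | .inr res => res)
        = pvOutA ((pvCands nums).foldl pvStepA (.inl (none, [0, 0]))) := by
    cases (pvCands nums).foldl pvStepA (.inl (none, [0, 0])) with
    | inl p => obtain ⟨a, b⟩ := p; rfl
    | inr r => rfl
  rw [hshape, hout, hct]
  rw [List.foldl_cons]
  have hstep0 : pvStepB (none, [0, 0]) c0 = (some c0.1, [c0.2.1, c0.2.2]) := by
    simp [pvStepB, pvInfGt]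
  rw [hstep0]
  have hpw := cands_pairwise nums
  rw [hct] at hpw
  obtain ⟨hb, ht⟩ := List.pairwise_cons.1 hpw
  rw [foldB_min t0 c0 hb ht]

-- the sorted list: permutation + strict lexicographic order ----------------
lemma insertBy_cons {α : Type} (b : α → α → Bool) (x y : α) (ys : List α) :
    PySem.List.insertBy b x (y :: ys)
      = if b x y then x :: y :: ys else y :: PySem.List.insertBy b x ys := rfl

lemma insertBy_pairwise {α : Type} (b : α → α → Bool)
    (hasym : ∀ x y, b x y = true → b y x = false)
    (htr : ∀ x y z, b x y = true → b z y = false → b z x = false)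
    (x : α) (l : List α) (hl : l.Pairwise (fun u v => b v u = false)) :
    (PySem.List.insertBy b x l).Pairwise (fun u v => b v u = false) := by
  induction l with
  | nil => simp [PySem.List.insertBy]
  | cons y ys ih =>
    rw [insertBy_cons]
    rcases List.pairwise_cons.1 hl with ⟨hy, hys⟩
    by_cases hxy : b x y = true
    · simp only [hxy, if_true]
      refine List.pairwise_cons.2 ⟨?_, hl⟩
      intro z hz
      rcases List.mem_cons.1 hz with rfl | hz
      · exact hasym _ _ hxy
      · exact htr x y z hxy (hy z hz)
    · simp only [hxy]
      refine List.pairwise_cons.2 ⟨?_, ih hys⟩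
      intro z hz
      rcases (PySem.List.mem_insertBy _ _ _ _).1 hz with rfl | hz
      · simpa using hxy
      · exact hy z hz

lemma sorted2_pairwise_blt (xs : List (Int × Int)) :
    (PySem.List.sorted2 xs (fun t => t.1) (fun t => t.2) false).Pairwise
      (fun u v => pvBLt v u = false) := by
  have hasym : ∀ x y : Int × Int, pvBLt x y = true → pvBLt y x = false := by
    intro x y h
    simp [pvBLt] at *
    omega
  have htr : ∀ x y z : Int × Int, pvBLt x y = true → pvBLt z y = false → pvBLt z x = false := by
    intro x y z h1 h2
    simp [pvBLt] at *
    omega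
  have key : ∀ (l : List (Int × Int)) (acc : List (Int × Int)),
      acc.Pairwise (fun u v => pvBLt v u = false) →
      (l.foldl (fun acc x => PySem.List.insertBy pvBLt x acc) acc).Pairwise
        (fun u v => pvBLt v u = false) := by
    intro l
    induction l with
    | nil => intro acc h; exact h
    | cons x t ih =>
      intro acc h
      exact ih _ (insertBy_pairwise pvBLt hasym htr x acc h)
  exact key xs [] (by simp)

lemma ps_perm (nums : List Int) : (pvPs nums).Perm (pvPfx nums) :=
  PySem.List.sorted2_perm _ _ _ _

lemma pfx_nodup (nums : List Int) : (pvPfx nums).Nodup := by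
  apply List.Nodup.map ?_ List.nodup_range
  intro a b h
  have := congrArg Prod.snd h
  simpa using this

lemma ps_pairwise (nums : List Int) : (pvPs nums).Pairwise pvLexLt := by
  have h1 : (pvPs nums).Pairwise (fun u v => pvBLt v u = false) := sorted2_pairwise_blt _
  have h2 : (pvPs nums).Nodup := (ps_perm nums).nodup_iff.2 (pfx_nodup nums)
  have h3 := List.Pairwise.and h1 h2
  apply h3.imp
  intro u v huv
  obtain ⟨hblt, hne⟩ := huv
  obtain ⟨u1, u2⟩ := u; obtain ⟨v1, v2⟩ := v
  simp [pvBLt] at hblt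
  simp [Prod.ext_iff] at hne
  simp only [pvLexLt]
  omega

lemma ps_length (nums : List Int) : (pvPs nums).length = nums.length + 1 := by
  simpa [pvPfx] using (ps_perm nums).length_eq

lemma ps_elem (nums : List Int) (a : Nat) (ha : a < (pvPs nums).length) :
    ∃ k ≤ nums.length, (pvPs nums)[a] = (pvS nums k, (k : Int)) := by
  have hm : (pvPs nums)[a] ∈ pvPfx nums := (ps_perm nums).mem_iff.1 (List.getElem_mem ha)
  simp only [pvPfx, List.mem_map, List.mem_range] at hm
  obtain ⟨k, hk, hke⟩ := hm
  exact ⟨k, by omega, hke.symm⟩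

-- B's port equals selection from pvMinL (pvAdj) ---------------------------
lemma built_eq (nums : List Int) :
    (List.range nums.length).foldl
      (fun (st : List (Int × Int) × Int) (k : Nat) =>
        (st.1 ++ [(st.2 + PySem.List.pyGetD nums (k : Int) 0, (k : Int) + 1)],
         st.2 + PySem.List.pyGetD nums (k : Int) 0))
      ([(0, 0)], 0)
      = (pvPfx nums, pvS nums nums.length) := by
  suffices h : ∀ m, m ≤ nums.length →
      (List.range m).foldl
        (fun (st : List (Int × Int) × Int) (k : Nat) =>
          (st.1 ++ [(st.2 + PySem.List.pyGetD nums (k : Int) 0, (k : Int) + 1)],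
           st.2 + PySem.List.pyGetD nums (k : Int) 0))
        ([(0, 0)], 0)
        = ((List.range (m + 1)).map (fun k => (pvS nums k, (k : Int))), pvS nums m) by
    exact h nums.length (le_refl _)
  intro m
  induction m with
  | zero =>
    intro _
    simp [pvS]
  | succ m ih =>
    intro hm
    rw [List.range_succ, List.foldl_append, ih (by omega)]
    simp only [List.foldl_cons, List.foldl_nil]
    rw [← pvS_succ nums m (by omega)]
    rw [show (List.range (m + 1 + 1)) = List.range (m + 1) ++ [m + 1] from List.range_succ,
      List.map_append]
    rfl

lemma candT_if (p q : Int × Int) :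
    ((q.1 - p.1, (if p.2 < q.2 then (p.2, q.2) else (q.2, p.2)).1,
      (if p.2 < q.2 then (p.2, q.2) else (q.2, p.2)).2 - 1) : Int × Int × Int) = pvCandT p q := by
  unfold pvCandT
  split <;> simp only [Prod.mk.injEq] <;> refine ⟨by simp, ?_, ?_⟩ <;> omega

lemma adj_length (nums : List Int) : (pvAdj nums).length = nums.length := by
  simp [pvAdj, ps_length]

lemma B_eq (nums : List Int) (h : nums ≠ []) :
    ∃ m, pvMinL (pvAdj nums) = some m ∧ subarraySumClosest_alt nums = [m.2.1, m.2.2] := by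
  have hn : 0 < nums.length := List.length_pos_iff.2 h
  have hadjne : pvAdj nums ≠ [] := by
    intro hnil
    have := adj_length nums
    rw [hnil] at this
    simp at this
    omega
  obtain ⟨m, hm⟩ : ∃ m, pvMinL (pvAdj nums) = some m := by
    obtain ⟨c, t, hct⟩ := List.exists_cons_of_ne_nil hadjne
    exact ⟨t.foldl pvM3 c, by rw [hct]; rfl⟩
  refine ⟨m, hm, ?_⟩
  simp only [subarraySumClosest_alt, if_neg h]
  rw [built_eq nums]
  have hps : PySem.List.sorted2 (pvPfx nums, pvS nums nums.length).1
      (fun t => t.1) (fun t => t.2) false = pvPs nums := rfl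
  rw [hps]
  have hfold :
      (List.range ((pvPs nums).length - 1)).foldl
        (fun (best : Option (Int × Int × Int)) (a : Nat) =>
          match best with
          | none => some ((PySem.List.pyGetD (pvPs nums) ((a : Int) + 1) (0, 0)).1 -
                (PySem.List.pyGetD (pvPs nums) (a : Int) (0, 0)).1,
              (if (PySem.List.pyGetD (pvPs nums) (a : Int) (0, 0)).2 <
                    (PySem.List.pyGetD (pvPs nums) ((a : Int) + 1) (0, 0)).2 then
                  ((PySem.List.pyGetD (pvPs nums) (a : Int) (0, 0)).2,
                    (PySem.List.pyGetD (pvPs nums) ((a : Int) + 1) (0, 0)).2)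
                else
                  ((PySem.List.pyGetD (pvPs nums) ((a : Int) + 1) (0, 0)).2,
                    (PySem.List.pyGetD (pvPs nums) (a : Int) (0, 0)).2)).1,
              (if (PySem.List.pyGetD (pvPs nums) (a : Int) (0, 0)).2 <
                    (PySem.List.pyGetD (pvPs nums) ((a : Int) + 1) (0, 0)).2 then
                  ((PySem.List.pyGetD (pvPs nums) (a : Int) (0, 0)).2,
                    (PySem.List.pyGetD (pvPs nums) ((a : Int) + 1) (0, 0)).2)
                else
                  ((PySem.List.pyGetD (pvPs nums) ((a : Int) + 1) (0, 0)).2,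
                    (PySem.List.pyGetD (pvPs nums) (a : Int) (0, 0)).2)).2 - 1)
          | some b =>
            if pvLt3 ((PySem.List.pyGetD (pvPs nums) ((a : Int) + 1) (0, 0)).1 -
                (PySem.List.pyGetD (pvPs nums) (a : Int) (0, 0)).1,
              (if (PySem.List.pyGetD (pvPs nums) (a : Int) (0, 0)).2 <
                    (PySem.List.pyGetD (pvPs nums) ((a : Int) + 1) (0, 0)).2 then
                  ((PySem.List.pyGetD (pvPs nums) (a : Int) (0, 0)).2,
                    (PySem.List.pyGetD (pvPs nums) ((a : Int) + 1) (0, 0)).2)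
                else
                  ((PySem.List.pyGetD (pvPs nums) ((a : Int) + 1) (0, 0)).2,
                    (PySem.List.pyGetD (pvPs nums) (a : Int) (0, 0)).2)).1,
              (if (PySem.List.pyGetD (pvPs nums) (a : Int) (0, 0)).2 <
                    (PySem.List.pyGetD (pvPs nums) ((a : Int) + 1) (0, 0)).2 then
                  ((PySem.List.pyGetD (pvPs nums) (a : Int) (0, 0)).2,
                    (PySem.List.pyGetD (pvPs nums) ((a : Int) + 1) (0, 0)).2)
                else
                  ((PySem.List.pyGetD (pvPs nums) ((a : Int) + 1) (0, 0)).2,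
                    (PySem.List.pyGetD (pvPs nums) (a : Int) (0, 0)).2)).2 - 1) b then
              some ((PySem.List.pyGetD (pvPs nums) ((a : Int) + 1) (0, 0)).1 -
                (PySem.List.pyGetD (pvPs nums) (a : Int) (0, 0)).1,
              (if (PySem.List.pyGetD (pvPs nums) (a : Int) (0, 0)).2 <
                    (PySem.List.pyGetD (pvPs nums) ((a : Int) + 1) (0, 0)).2 then
                  ((PySem.List.pyGetD (pvPs nums) (a : Int) (0, 0)).2,
                    (PySem.List.pyGetD (pvPs nums) ((a : Int) + 1) (0, 0)).2)
                else
                  ((PySem.List.pyGetD (pvPs nums) ((a : Int) + 1) (0, 0)).2,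
                    (PySem.List.pyGetD (pvPs nums) (a : Int) (0, 0)).2)).1,
              (if (PySem.List.pyGetD (pvPs nums) (a : Int) (0, 0)).2 <
                    (PySem.List.pyGetD (pvPs nums) ((a : Int) + 1) (0, 0)).2 then
                  ((PySem.List.pyGetD (pvPs nums) (a : Int) (0, 0)).2,
                    (PySem.List.pyGetD (pvPs nums) ((a : Int) + 1) (0, 0)).2)
                else
                  ((PySem.List.pyGetD (pvPs nums) ((a : Int) + 1) (0, 0)).2,
                    (PySem.List.pyGetD (pvPs nums) (a : Int) (0, 0)).2)).2 - 1)
            else some b)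
        none
        = pvMinL (pvAdj nums) := by
    rw [← foldB_minL (pvAdj nums) hadjne, pvAdj, List.foldl_map]
    apply PySem.List.foldl_congr_mem
    intro best a ha
    have ha' : a < (pvPs nums).length - 1 := List.mem_range.1 ha
    have hlen := ps_length nums
    have hg1 : PySem.List.pyGetD (pvPs nums) (a : Int) (0, 0) = (pvPs nums).getD a (0, 0) :=
      PySem.List.pyGetD_natCast _ _ _
    have hg2 : PySem.List.pyGetD (pvPs nums) ((a : Int) + 1) (0, 0)
        = (pvPs nums).getD (a + 1) (0, 0) := by
      rw [show ((a : Int) + 1) = ((a + 1 : Nat) : Int) by push_cast; ring]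
      exact PySem.List.pyGetD_natCast _ _ _
    rw [hg1, hg2, candT_if]
  rw [hfold, hm]

-- each adjacent candidate is a candidate ----------------------------------
lemma adj_sub (nums : List Int) : ∀ x ∈ pvAdj nums, x ∈ pvCands nums := by
  intro x hx
  simp only [pvAdj, List.mem_map, List.mem_range] at hx
  obtain ⟨a, ha, rfl⟩ := hx
  have hlen := ps_length nums
  have h1 : a < (pvPs nums).length := by omega
  have h2 : a + 1 < (pvPs nums).length := by omega
  rw [List.getD_eq_getElem _ _ h1, List.getD_eq_getElem _ _ h2]
  obtain ⟨k1, hk1, he1⟩ := ps_elem nums a h1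
  obtain ⟨k2, hk2, he2⟩ := ps_elem nums (a + 1) h2
  have hlex : pvLexLt (pvPs nums)[a] (pvPs nums)[a + 1] :=
    (List.pairwise_iff_getElem.1 (ps_pairwise nums)) a (a + 1) h1 h2 (by omega)
  rw [he1, he2] at hlex ⊢
  simp only [pvLexLt] at hlex
  have hv : pvS nums k1 ≤ pvS nums k2 := by
    rcases hlex with hh | hh
    · exact le_of_lt hh
    · exact le_of_eq hh.1
  have hne : k1 ≠ k2 := by
    intro he
    subst he
    rcases hlex with hh | hh
    · omega
    · have := hh.2; omega
  rw [mem_cands]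
  rcases Nat.lt_or_ge k1 k2 with hlt | hge
  · refine ⟨k1, k2, hlt, hk2, ?_⟩
    have habs : |pvS nums k2 - pvS nums k1| = pvS nums k2 - pvS nums k1 :=
      abs_of_nonneg (by omega)
    rw [habs]
    simp only [pvCandT, Prod.mk.injEq]
    refine ⟨by simp, by omega, by omega⟩
  · have hlt : k2 < k1 := by omega
    refine ⟨k2, k1, hlt, hk1, ?_⟩
    have habs : |pvS nums k1 - pvS nums k2| = pvS nums k2 - pvS nums k1 := by
      rw [abs_sub_comm]
      exact abs_of_nonneg (by omega)
    rw [habs]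
    simp only [pvCandT, Prod.mk.injEq]
    refine ⟨by simp, by omega, by omega⟩

-- the key combinatorial lemma: any pair of the sorted prefix list is dominated
-- by an adjacent pair of it ------------------------------------------------
lemma adj_dom (nums : List Int) :
    ∀ d α β, β - α = d → α < β → β < (pvPs nums).length →
      ∃ c, α ≤ c ∧ c + 1 ≤ β ∧
        (pvLt3 (pvCandT ((pvPs nums).getD c (0,0)) ((pvPs nums).getD (c+1) (0,0)))
               (pvCandT ((pvPs nums).getD α (0,0)) ((pvPs nums).getD β (0,0))) = true ∨
         pvCandT ((pvPs nums).getD c (0,0)) ((pvPs nums).getD (c+1) (0,0))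
           = pvCandT ((pvPs nums).getD α (0,0)) ((pvPs nums).getD β (0,0))) := by
  intro d
  induction d using Nat.strong_induction_on with
  | _ d ih =>
    intro α β hd hab hβ
    by_cases hstep : β = α + 1
    · subst hstep
      exact ⟨α, le_refl _, le_refl _, Or.inr rfl⟩
    · have hβ2 : α + 2 ≤ β := by omega
      have hα : α < (pvPs nums).length := by omega
      have hγ : α + 1 < (pvPs nums).length := by omega
      have gα : (pvPs nums).getD α (0,0) = (pvPs nums)[α] := List.getD_eq_getElem _ _ hα
      have gγ : (pvPs nums).getD (α+1) (0,0) = (pvPs nums)[α+1] := List.getD_eq_getElem _ _ hγ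
      have gβ : (pvPs nums).getD β (0,0) = (pvPs nums)[β] := List.getD_eq_getElem _ _ hβ
      have hpg := List.pairwise_iff_getElem.1 (ps_pairwise nums)
      have l1 : pvLexLt (pvPs nums)[α] (pvPs nums)[α+1] := hpg α (α+1) hα hγ (by omega)
      have l2 : pvLexLt (pvPs nums)[α+1] (pvPs nums)[β] := hpg (α+1) β hγ hβ (by omega)
      have l3 : pvLexLt (pvPs nums)[α] (pvPs nums)[β] := hpg α β hα hβ (by omega)
      by_cases hv : ((pvPs nums)[α]).1 = ((pvPs nums)[β]).1
      · refine ⟨α, le_refl _, by omega, Or.inl ?_⟩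
        rw [gα, gγ, gβ]
        set su := (pvPs nums)[α] with hsu
        set sv := (pvPs nums)[α+1] with hsv
        set sw := (pvPs nums)[β] with hsw
        obtain ⟨u1, u2⟩ := su
        obtain ⟨v1, v2⟩ := sv
        obtain ⟨w1, w2⟩ := sw
        simp only [pvLexLt] at l1 l2 l3
        simp only [pvCandT, pvLt3, Bool.or_eq_true, Bool.and_eq_true, decide_eq_true_eq]
        simp only at hv
        omega
      · have hvlt : ((pvPs nums)[α]).1 < ((pvPs nums)[β]).1 := by
          rcases l3 with hh | hh
          · exact hh
          · exact absurd hh.1 hv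
        by_cases hγv : ((pvPs nums)[α+1]).1 < ((pvPs nums)[β]).1
        · refine ⟨α, le_refl _, by omega, Or.inl ?_⟩
          rw [gα, gγ, gβ]
          set su := (pvPs nums)[α] with hsu
          set sv := (pvPs nums)[α+1] with hsv
          set sw := (pvPs nums)[β] with hsw
          obtain ⟨u1, u2⟩ := su
          obtain ⟨v1, v2⟩ := sv
          obtain ⟨w1, w2⟩ := sw
          simp only [pvCandT, pvLt3, Bool.or_eq_true, Bool.and_eq_true, decide_eq_true_eq]
          simp only at hγv
          left
          omega
        · have hγe : ((pvPs nums)[α+1]).1 = ((pvPs nums)[β]).1 := by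
            rcases l2 with hh | hh
            · omega
            · exact hh.1
          obtain ⟨c, hc1, hc2, hle⟩ := ih (β - (α+1)) (by omega) (α+1) β rfl (by omega) hβ
          refine ⟨c, by omega, hc2, Or.inl ?_⟩
          have hmid : pvLt3 (pvCandT ((pvPs nums).getD (α+1) (0,0)) ((pvPs nums).getD β (0,0)))
              (pvCandT ((pvPs nums).getD α (0,0)) ((pvPs nums).getD β (0,0))) = true := by
            rw [gα, gγ, gβ]
            set su := (pvPs nums)[α] with hsu
            set sv := (pvPs nums)[α+1] with hsv
            set sw := (pvPs nums)[β] with hsw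
            obtain ⟨u1, u2⟩ := su
            obtain ⟨v1, v2⟩ := sv
            obtain ⟨w1, w2⟩ := sw
            simp only [pvCandT, pvLt3, Bool.or_eq_true, Bool.and_eq_true, decide_eq_true_eq]
            simp only at hγe hvlt
            left
            omega
          rcases hle with hlt' | heq'
          · exact lt3_trans hlt' hmid
          · rw [heq']
            exact hmid

-- the two minima coincide --------------------------------------------------
lemma min_eq (nums : List Int) (h : nums ≠ []) : pvMinL (pvCands nums) = pvMinL (pvAdj nums) := by
  have hn : 0 < nums.length := List.length_pos_iff.2 h
  have hlen := ps_length nums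
  obtain ⟨mA, hmA⟩ : ∃ m, pvMinL (pvCands nums) = some m := by
    have hmem : pvTrip nums 0 0 ∈ pvCands nums := by
      simp only [pvCands, List.mem_flatMap, List.mem_map, List.mem_range, List.mem_range'_1]
      exact ⟨0, hn, 0, ⟨le_refl 0, by omega⟩, rfl⟩
    obtain ⟨c, t, hct⟩ := List.exists_cons_of_ne_nil (List.ne_nil_of_mem hmem)
    exact ⟨t.foldl pvM3 c, by rw [hct]; rfl⟩
  obtain ⟨mB, hmB⟩ : ∃ m, pvMinL (pvAdj nums) = some m := by
    have hne : pvAdj nums ≠ [] := by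
      intro hnil
      have := adj_length nums
      rw [hnil] at this
      simp at this
      omega
    obtain ⟨c, t, hct⟩ := List.exists_cons_of_ne_nil hne
    exact ⟨t.foldl pvM3 c, by rw [hct]; rfl⟩
  rw [hmA, hmB]
  have h1 : pvLt3 mB mA = false :=
    minL_min hmA mB (adj_sub nums mB (minL_mem hmB))
  -- a representation of mA as a pair of prefix indices
  have hAmem := minL_mem hmA
  rw [mem_cands] at hAmem
  obtain ⟨p, q, hpq, hqn, hrep⟩ := hAmem
  have hpmem : ((pvS nums p, (p : Int)) : Int × Int) ∈ pvPs nums := by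
    rw [(ps_perm nums).mem_iff]
    simp only [pvPfx, List.mem_map, List.mem_range]
    exact ⟨p, by omega, rfl⟩
  have hqmem : ((pvS nums q, (q : Int)) : Int × Int) ∈ pvPs nums := by
    rw [(ps_perm nums).mem_iff]
    simp only [pvPfx, List.mem_map, List.mem_range]
    exact ⟨q, by omega, rfl⟩
  obtain ⟨α, hαlt, hαe⟩ := List.getElem_of_mem hpmem
  obtain ⟨β, hβlt, hβe⟩ := List.getElem_of_mem hqmem
  have hpg := List.pairwise_iff_getElem.1 (ps_pairwise nums)
  have hαβ : α ≠ β := by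
    intro he
    subst he
    rw [hαe] at hβe
    have := congrArg Prod.snd hβe
    simp at this
    omega
  -- in either position order, pvCandT of the two positions equals mA,
  -- and adj_dom produces an adjacent candidate dominating it
  have hdom : ∃ x ∈ pvAdj nums, pvLt3 x mA = true ∨ x = mA := by
    rcases Nat.lt_or_ge α β with hlt | hge
    · have hlex : pvLexLt (pvPs nums)[α] (pvPs nums)[β] := hpg α β hαlt hβlt hlt
      rw [hαe, hβe] at hlex
      have hvle : pvS nums p ≤ pvS nums q := by
        rcases hlex with hh | hh
        · exact le_of_lt hh
        · exact le_of_eq hh.1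
      have hcand : pvCandT ((pvPs nums).getD α (0,0)) ((pvPs nums).getD β (0,0)) = mA := by
        rw [List.getD_eq_getElem _ _ hαlt, List.getD_eq_getElem _ _ hβlt, hαe, hβe, hrep]
        simp only [pvCandT, Prod.mk.injEq]
        refine ⟨(abs_of_nonneg (by omega)).symm, by omega, by omega⟩
      obtain ⟨c, hc1, hc2, hle⟩ := adj_dom nums (β - α) α β rfl hlt hβlt
      refine ⟨pvCandT ((pvPs nums).getD c (0,0)) ((pvPs nums).getD (c+1) (0,0)), ?_, ?_⟩
      · simp only [pvAdj, List.mem_map, List.mem_range]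
        exact ⟨c, by omega, rfl⟩
      · rw [← hcand]
        exact hle
    · have hlt : β < α := by omega
      have hlex : pvLexLt (pvPs nums)[β] (pvPs nums)[α] := hpg β α hβlt hαlt hlt
      rw [hαe, hβe] at hlex
      have hvle : pvS nums q ≤ pvS nums p := by
        rcases hlex with hh | hh
        · exact le_of_lt hh
        · exact le_of_eq hh.1
      have hcand : pvCandT ((pvPs nums).getD β (0,0)) ((pvPs nums).getD α (0,0)) = mA := by
        rw [List.getD_eq_getElem _ _ hβlt, List.getD_eq_getElem _ _ hαlt, hαe, hβe, hrep]
        simp only [pvCandT, Prod.mk.injEq]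
        refine ⟨?_, by omega, by omega⟩
        rw [abs_sub_comm]
        exact (abs_of_nonneg (by omega)).symm
      obtain ⟨c, hc1, hc2, hle⟩ := adj_dom nums (α - β) β α rfl hlt hαlt
      refine ⟨pvCandT ((pvPs nums).getD c (0,0)) ((pvPs nums).getD (c+1) (0,0)), ?_, ?_⟩
      · simp only [pvAdj, List.mem_map, List.mem_range]
        exact ⟨c, by omega, rfl⟩
      · rw [← hcand]
        exact hle
  obtain ⟨x, hxadj, hxle⟩ := hdom
  have h2 : pvLt3 mA mB = false := by
    by_contra hx
    rw [Bool.not_eq_false] at hx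
    have hxmin := minL_min hmB x hxadj
    rcases hxle with hlt' | heq'
    · have := lt3_trans hlt' hx
      simp [this] at hxmin
    · rw [heq'] at hxmin
      simp [hx] at hxmin
  rw [lt3_conn h2 h1]

-- ===== VERDICT (by name: the statement is the Claim_ definition above) =====
theorem subarraySumClosest_spec : Claim_equal_subarraySumClosest := by
  intro nums _
  unfold Spec_subarraySumClosest
  by_cases h : nums = []
  · subst h; rfl
  · obtain ⟨m, hm, hA⟩ := A_eq nums h
    obtain ⟨m', hm', hB⟩ := B_eq nums h
    rw [min_eq nums h, hm'] at hm
    cases hm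
    rw [hA, hB]
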